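-- pv_equiv track=rewrite | github.com/wornjss1002/WTFuzz | ssrf-modules/input/json_parser.py | _classify_endpoint
-- ===== SOURCE A (Python) =====
-- def _classify_endpoint(url: str) -> str:
--     """엔드포인트 유형 분류"""
--     url_lower = url.lower()
--
--     if '/api/' in url_lower:
--         return 'api'
--     elif any(keyword in url_lower for keyword in ['upload', 'file']):
--         return 'file_upload'
--     elif any(keyword in url_lower for keyword in ['redirect', 'forward']):
--         return 'redirect'
--     elif any(keyword in url_lower for keyword in ['proxy', 'fetch']):
--         return 'proxy'
--     elif any(keyword in url_lower for keyword in ['webhook', 'callback']):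
--         return 'webhook'
--     elif any(keyword in url_lower for keyword in ['admin', 'manage']):
--         return 'admin'
--     else:
--         return 'general'
-- ===== SOURCE B (Python) =====
-- # Position-scan classifier: instead of testing each category's keywords against the
-- # whole string, walk the lowered string once and at each offset test which keywords
-- # start there, keeping the minimum category priority seen; return that category.
-- _KW = [('/api/', 0), ('upload', 1), ('file', 1), ('redirect', 2), ('forward', 2),
--        ('proxy', 3), ('fetch', 3), ('webhook', 4), ('callback', 4),
--        ('admin', 5), ('manage', 5)]
-- _LABELS = ['api', 'file_upload', 'redirect', 'proxy', 'webhook', 'admin', 'general']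
--
-- def _classify_endpoint(url: str) -> str:
--     u = url.lower()
--     best = 6
--     for i in range(len(u)):
--         for kw, p in _KW:
--             if p < best and u.startswith(kw, i):
--                 best = p
--     return _LABELS[best]
-- ===== Notes on version B (the rewrite author's own statement) =====
-- stated objective: alternative
-- what changed: Replaces the per-category chain of whole-string substring searches by a single left-to-right scan over the lowered string that, at each offset, tests which keywords start there and keeps the minimum category priority; the label is read off the priority at the end.
import Mathlib
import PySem

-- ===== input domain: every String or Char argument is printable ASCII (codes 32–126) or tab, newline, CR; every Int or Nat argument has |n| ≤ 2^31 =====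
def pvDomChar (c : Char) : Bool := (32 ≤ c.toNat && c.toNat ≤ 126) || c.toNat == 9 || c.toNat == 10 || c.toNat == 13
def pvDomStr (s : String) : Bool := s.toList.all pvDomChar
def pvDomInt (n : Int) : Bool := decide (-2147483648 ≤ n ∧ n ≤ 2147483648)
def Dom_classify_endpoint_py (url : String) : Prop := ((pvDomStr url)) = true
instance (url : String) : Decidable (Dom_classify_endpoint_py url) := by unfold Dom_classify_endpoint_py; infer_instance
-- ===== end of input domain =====

-- B replaces A's per-category whole-string substring searches by a single position scan of
-- the lowered string with a min-priority accumulator (alternative algorithm; same cost).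

-- ===== PORT A =====
def classify_endpoint_py (url : String) : String :=
  let url_lower := PySem.Str.lower url
  if PySem.Str.isIn "/api/" url_lower then "api"
  else if ["upload", "file"].any (fun keyword => PySem.Str.isIn keyword url_lower) then "file_upload"
  else if ["redirect", "forward"].any (fun keyword => PySem.Str.isIn keyword url_lower) then "redirect"
  else if ["proxy", "fetch"].any (fun keyword => PySem.Str.isIn keyword url_lower) then "proxy"
  else if ["webhook", "callback"].any (fun keyword => PySem.Str.isIn keyword url_lower) then "webhook"
  else if ["admin", "manage"].any (fun keyword => PySem.Str.isIn keyword url_lower) then "admin"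
  else "general"

-- ===== PORT B =====
-- Source B's _KW table (keyword, priority) and _LABELS table
def pvKW : List (List Char × Nat) :=
  [("/api/".toList, 0), ("upload".toList, 1), ("file".toList, 1),
   ("redirect".toList, 2), ("forward".toList, 2),
   ("proxy".toList, 3), ("fetch".toList, 3),
   ("webhook".toList, 4), ("callback".toList, 4),
   ("admin".toList, 5), ("manage".toList, 5)]

def pvLabels : List String :=
  ["api", "file_upload", "redirect", "proxy", "webhook", "admin", "general"]

-- Python's u.startswith(kw, i) is 'kw is a prefix of u[i:]', i.e. startswith (u.drop i) kw.
def classify_endpoint_py_alt (url : String) : String :=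
  let u := PySem.Chars.lower url.toList
  let best := (List.range u.length).foldl
    (fun best i =>
      pvKW.foldl (fun b kp =>
        if kp.2 < b && PySem.Chars.startswith (u.drop i) kp.1 then kp.2 else b) best)
    6
  pvLabels.getD best "general"

-- ===== PRECONDITION & SPEC =====
def Spec_classify_endpoint_py (url : String) (out : String) : Prop := out = classify_endpoint_py_alt url
instance (url : String) (out : String) : Decidable (Spec_classify_endpoint_py url out) := by unfold Spec_classify_endpoint_py; infer_instance

-- ===== CLAIM (what is proved, stated in full; the proofs are below) =====
def Claim_equal_classify_endpoint_py : Prop := ∀ (url : String), Dom_classify_endpoint_py url → Spec_classify_endpoint_py url (classify_endpoint_py url)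

-- ===== LEMMAS AND PROOFS =====

-- the minimum priority of a keyword starting exactly at the head of s (6 if none)
def pvMinAt (s : List Char) (kws : List (List Char × Nat)) : Nat :=
  kws.foldr (fun kp a => if PySem.Chars.startswith s kp.1 then min kp.2 a else a) 6

lemma pvMinAt_le_six (s : List Char) (kws : List (List Char × Nat)) : pvMinAt s kws ≤ 6 := by
  induction kws with
  | nil => simp [pvMinAt]
  | cons kp t ih => simp only [pvMinAt, List.foldr_cons] at *; split_ifs <;> omega

-- Source B's inner loop computes min b (pvMinAt s kws)
lemma pvMinAt_cons (s : List Char) (kp : List Char × Nat) (t : List (List Char × Nat)) :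
    pvMinAt s (kp :: t)
      = if PySem.Chars.startswith s kp.1 then min kp.2 (pvMinAt s t) else pvMinAt s t := rfl

-- Source B's inner loop computes min b (pvMinAt s kws)
lemma inner_eq (s : List Char) (kws : List (List Char × Nat)) (b : Nat) (hb : b ≤ 6)
    (hk : ∀ kp ∈ kws, kp.2 < 6) :
    kws.foldl (fun b kp =>
      if kp.2 < b && PySem.Chars.startswith s kp.1 then kp.2 else b) b
      = min b (pvMinAt s kws) := by
  induction kws generalizing b with
  | nil => simp [pvMinAt]; omega
  | cons kp t ih =>
      have ht : ∀ kq ∈ t, kq.2 < 6 := fun kq hq => hk kq (by simp [hq])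
      have hkp : kp.2 < 6 := hk kp (by simp)
      simp only [List.foldl_cons, pvMinAt_cons]
      by_cases hs : PySem.Chars.startswith s kp.1 = true
      · simp only [hs, Bool.and_true, if_true]
        rw [ih _ (by split_ifs <;> omega) ht]
        have := pvMinAt_le_six s t
        split_ifs with h <;> simp only [decide_eq_true_eq] at h <;> omega
      · simp only [Bool.not_eq_true] at hs
        simp only [hs, Bool.and_false]
        exact ih b hb ht


-- the scan's overall minimum priority over all start positions
def pvM (u : List Char) : Nat :=
  (List.range u.length).foldr (fun i a => min (pvMinAt (u.drop i) pvKW) a) 6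

lemma foldr_min_le_six (u : List Char) (L : List Nat) :
    L.foldr (fun i a => min (pvMinAt (u.drop i) pvKW) a) 6 ≤ 6 := by
  induction L with
  | nil => simp
  | cons i t ih => simp only [List.foldr_cons]; omega

-- Source B's outer loop computes min b (pvM-style foldr)
lemma outer_eq (u : List Char) (L : List Nat) (b : Nat) (hb : b ≤ 6) :
    L.foldl (fun b i => pvKW.foldl (fun b kp =>
        if kp.2 < b && PySem.Chars.startswith (u.drop i) kp.1 then kp.2 else b) b) b
      = min b (L.foldr (fun i a => min (pvMinAt (u.drop i) pvKW) a) 6) := by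
  induction L generalizing b with
  | nil => simp; omega
  | cons i t ih =>
      simp only [List.foldl_cons, List.foldr_cons]
      rw [inner_eq _ _ b hb (by decide), ih _ (by omega)]
      have h1 := pvMinAt_le_six (u.drop i) pvKW
      have h2 := foldr_min_le_six u t
      omega

lemma alt_eq (url : String) :
    classify_endpoint_py_alt url
      = pvLabels.getD (pvM (PySem.Chars.lower url.toList)) "general" := by
  unfold classify_endpoint_py_alt pvM
  dsimp only
  rw [outer_eq _ _ 6 le_rfl, Nat.min_eq_right (foldr_min_le_six _ _)]

lemma pvMinAt_le (s : List Char) (kws : List (List Char × Nat)) (kw : List Char) (p : Nat)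
    (hm : (kw, p) ∈ kws) (hs : PySem.Chars.startswith s kw = true) :
    pvMinAt s kws ≤ p := by
  induction kws with
  | nil => cases hm
  | cons kp t ih =>
      rw [pvMinAt_cons]
      rcases List.mem_cons.mp hm with he | hmt
      · rw [← he] at *; simp [hs]
      · have := ih hmt; split_ifs <;> omega

lemma pvMinAt_wit (s : List Char) (kws : List (List Char × Nat)) :
    pvMinAt s kws = 6 ∨
      ∃ kp ∈ kws, PySem.Chars.startswith s kp.1 = true ∧ pvMinAt s kws = kp.2 := by
  induction kws with
  | nil => left; rfl
  | cons kp t ih =>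
      rw [pvMinAt_cons]
      by_cases hs : PySem.Chars.startswith s kp.1 = true
      · simp only [hs, if_true]
        rcases Nat.le_total kp.2 (pvMinAt s t) with h | h
        · right; exact ⟨kp, by simp, hs, by omega⟩
        · rcases ih with h6 | ⟨kq, hq, hsq, he⟩
          · left; omega
          · right; exact ⟨kq, by simp [hq], hsq, by omega⟩
      · simp only [Bool.not_eq_true] at hs
        simp only [hs, Bool.false_eq_true, if_false]
        rcases ih with h6 | ⟨kq, hq, hsq, he⟩
        · left; exact h6
        · right; exact ⟨kq, by simp [hq], hsq, he⟩

lemma foldr_min_le_mem (u : List Char) (L : List Nat) (i : Nat) (hi : i ∈ L) :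
    L.foldr (fun i a => min (pvMinAt (u.drop i) pvKW) a) 6 ≤ pvMinAt (u.drop i) pvKW := by
  induction L with
  | nil => cases hi
  | cons j t ih =>
      simp only [List.foldr_cons]
      rcases List.mem_cons.mp hi with he | hmt
      · subst he; omega
      · have := ih hmt; omega

lemma pvM_le (u : List Char) (i : Nat) (hi : i < u.length) :
    pvM u ≤ pvMinAt (u.drop i) pvKW :=
  foldr_min_le_mem u _ i (List.mem_range.mpr hi)

lemma foldr_min_wit (u : List Char) (L : List Nat) :
    L.foldr (fun i a => min (pvMinAt (u.drop i) pvKW) a) 6 = 6 ∨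
      ∃ i ∈ L, L.foldr (fun i a => min (pvMinAt (u.drop i) pvKW) a) 6 = pvMinAt (u.drop i) pvKW := by
  induction L with
  | nil => left; rfl
  | cons j t ih =>
      simp only [List.foldr_cons]
      rcases Nat.le_total (pvMinAt (u.drop j) pvKW)
        (t.foldr (fun i a => min (pvMinAt (u.drop i) pvKW) a) 6) with h | h
      · right; exact ⟨j, by simp, by omega⟩
      · rcases ih with h6 | ⟨i, hi, he⟩
        · left; omega
        · right; exact ⟨i, by simp [hi], by omega⟩

lemma pvM_wit (u : List Char) :
    pvM u = 6 ∨ ∃ i, i < u.length ∧ pvM u = pvMinAt (u.drop i) pvKW := by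
  rcases foldr_min_wit u (List.range u.length) with h | ⟨i, hi, he⟩
  · left; exact h
  · right; exact ⟨i, List.mem_range.mp hi, he⟩

-- 'kw in u' ↔ kw starts at some position i < len(u), for nonempty kw
lemma isIn_iff_exists (u kw : List Char) (hk : kw ≠ []) :
    PySem.Chars.isIn kw u = true ↔
      ∃ i, i < u.length ∧ PySem.Chars.startswith (u.drop i) kw = true := by
  rw [← PySem.Chars.exists_prefix_drop_iff_isIn]
  constructor
  · rintro ⟨j, hj⟩
    by_cases hjl : j < u.length
    · exact ⟨j, hjl, (PySem.Chars.startswith_iff _ _).mpr hj⟩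
    · exfalso
      rw [List.drop_eq_nil_of_le (by omega)] at hj
      exact hk (List.prefix_nil.mp hj)
  · rintro ⟨i, _, hs⟩
    exact ⟨i, (PySem.Chars.startswith_iff _ _).mp hs⟩

lemma pvM_le_of_isIn (u kw : List Char) (p : Nat) (hm : (kw, p) ∈ pvKW)
    (hin : PySem.Chars.isIn kw u = true) : pvM u ≤ p := by
  have hk : kw ≠ [] := by
    have h : ∀ kp ∈ pvKW, kp.1 ≠ ([] : List Char) := by decide
    exact h (kw, p) hm
  obtain ⟨i, hi, hs⟩ := (isIn_iff_exists u kw hk).mp hin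
  exact le_trans (pvM_le u i hi) (pvMinAt_le _ _ _ _ hm hs)

lemma pvM_wit_isIn (u : List Char) :
    pvM u = 6 ∨ ∃ kp ∈ pvKW, PySem.Chars.isIn kp.1 u = true ∧ pvM u = kp.2 := by
  rcases pvM_wit u with h | ⟨i, hi, he⟩
  · left; exact h
  · rcases pvMinAt_wit (u.drop i) pvKW with h6 | ⟨kp, hkp, hs, he2⟩
    · left; omega
    · right
      refine ⟨kp, hkp, ?_, by omega⟩
      exact (PySem.Chars.exists_prefix_drop_iff_isIn _ _).mp
        ⟨i, (PySem.Chars.startswith_iff _ _).mp hs⟩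

lemma pvM_eq (u : List Char) (p : Nat)
    (hlow : ∃ kw, (kw, p) ∈ pvKW ∧ PySem.Chars.isIn kw u = true)
    (hhigh : ∀ kp ∈ pvKW, kp.2 < p → PySem.Chars.isIn kp.1 u = false) : pvM u = p := by
  obtain ⟨kw, hm, hin⟩ := hlow
  have h1 : pvM u ≤ p := pvM_le_of_isIn u kw p hm hin
  have hp6 : p < 6 := by
    have h : ∀ kp ∈ pvKW, kp.2 < 6 := by decide
    exact h (kw, p) hm
  rcases pvM_wit_isIn u with h | ⟨kp, hkp, hin2, he⟩
  · omega
  · have hnot : ¬ kp.2 < p := fun hlt => by rw [hhigh kp hkp hlt] at hin2; cases hin2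
    omega

lemma pvM_eq_six (u : List Char)
    (h : ∀ kp ∈ pvKW, PySem.Chars.isIn kp.1 u = false) : pvM u = 6 := by
  rcases pvM_wit_isIn u with h6 | ⟨kp, hkp, hin, _⟩
  · exact h6
  · rw [h kp hkp] at hin; cases hin

-- ===== VERDICT (by name: the statement is the Claim_ definition above) =====
theorem classify_endpoint_py_spec : Claim_equal_classify_endpoint_py := by
  intro url _
  unfold Spec_classify_endpoint_py classify_endpoint_py
  rw [alt_eq]
  simp only [PySem.Str.isIn_eq, PySem.Str.toList_lower, List.any_cons, List.any_nil,
    Bool.or_false]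
  split_ifs with h0 h1 h2 h4 h5 h6
  · rw [pvM_eq _ 0 ⟨"/api/".toList, by decide, h0⟩ (fun kp _ hlt => absurd hlt (Nat.not_lt_zero _))]; rfl
  · simp only [Bool.not_eq_true] at h0
    simp only [Bool.or_eq_true] at h1
    have hhigh : ∀ kp ∈ pvKW, kp.2 < 1 →
        PySem.Chars.isIn kp.1 (PySem.Chars.lower url.toList) = false := by
      intro kp hkp hlt; fin_cases hkp <;> simp_all
    rcases h1 with h | h
    · rw [pvM_eq _ 1 ⟨"upload".toList, by decide, h⟩ hhigh]; rfl
    · rw [pvM_eq _ 1 ⟨"file".toList, by decide, h⟩ hhigh]; rfl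
  · simp only [Bool.not_eq_true, Bool.or_eq_true, not_or] at h0 h1
    simp only [Bool.or_eq_true] at h2
    have hhigh : ∀ kp ∈ pvKW, kp.2 < 2 →
        PySem.Chars.isIn kp.1 (PySem.Chars.lower url.toList) = false := by
      intro kp hkp hlt; fin_cases hkp <;> simp_all
    rcases h2 with h | h
    · rw [pvM_eq _ 2 ⟨"redirect".toList, by decide, h⟩ hhigh]; rfl
    · rw [pvM_eq _ 2 ⟨"forward".toList, by decide, h⟩ hhigh]; rfl
  · simp only [Bool.not_eq_true, Bool.or_eq_true, not_or] at h0 h1 h2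
    simp only [Bool.or_eq_true] at h4
    have hhigh : ∀ kp ∈ pvKW, kp.2 < 3 →
        PySem.Chars.isIn kp.1 (PySem.Chars.lower url.toList) = false := by
      intro kp hkp hlt; fin_cases hkp <;> simp_all
    rcases h4 with h | h
    · rw [pvM_eq _ 3 ⟨"proxy".toList, by decide, h⟩ hhigh]; rfl
    · rw [pvM_eq _ 3 ⟨"fetch".toList, by decide, h⟩ hhigh]; rfl
  · simp only [Bool.not_eq_true, Bool.or_eq_true, not_or] at h0 h1 h2 h4
    simp only [Bool.or_eq_true] at h5
    have hhigh : ∀ kp ∈ pvKW, kp.2 < 4 →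
        PySem.Chars.isIn kp.1 (PySem.Chars.lower url.toList) = false := by
      intro kp hkp hlt; fin_cases hkp <;> simp_all
    rcases h5 with h | h
    · rw [pvM_eq _ 4 ⟨"webhook".toList, by decide, h⟩ hhigh]; rfl
    · rw [pvM_eq _ 4 ⟨"callback".toList, by decide, h⟩ hhigh]; rfl
  · simp only [Bool.not_eq_true, Bool.or_eq_true, not_or] at h0 h1 h2 h4 h5
    simp only [Bool.or_eq_true] at h6
    have hhigh : ∀ kp ∈ pvKW, kp.2 < 5 →
        PySem.Chars.isIn kp.1 (PySem.Chars.lower url.toList) = false := by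
      intro kp hkp hlt; fin_cases hkp <;> simp_all
    rcases h6 with h | h
    · rw [pvM_eq _ 5 ⟨"admin".toList, by decide, h⟩ hhigh]; rfl
    · rw [pvM_eq _ 5 ⟨"manage".toList, by decide, h⟩ hhigh]; rfl
  · simp only [Bool.not_eq_true, Bool.or_eq_true, not_or] at h0 h1 h2 h4 h5 h6
    rw [pvM_eq_six _ (by intro kp hkp; fin_cases hkp <;> simp_all)]; rfl
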